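-- pv_equiv track=rewrite | github.com/Adarshb2000/coding | CF_748E.py | cf_748E
-- ===== SOURCE A (Python) =====
-- from collections import defaultdict
--
-- def cf_748E(tree: defaultdict, k: int):
--     for _ in range(k):
--         if len(tree) in [1, 2]:
--             return 0
--         removed = defaultdict(list)
--         for key, value in tree.items():
--             if len(value) == 1:
--                 removed[value.pop()].append(key)
--
--
--         for key, value in removed.items():
--             for val in value:
--                 tree[key].discard(val)
--                 del tree[val]
--
--     return len(tree)
-- ===== SOURCE B (Python) =====
-- def cf_748E(tree, k):
--     # Degree-counter leaf peeling: keep a degree map, a removed set and the current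
--     # leaf frontier; each round touches only the frontier's neighbourhoods (every
--     # adjacency list is scanned at most once overall), instead of A's full rescan
--     # and in-place rebuild of the dict every round.  B does not mutate `tree`.
--     deg = {x: len(s) for x, s in tree.items()}
--     removed = set()
--     frontier = [x for x, d0 in deg.items() if d0 == 1]
--     size = len(tree)
--     rounds = k
--     while rounds > 0:
--         if size in (1, 2):
--             return 0
--         if not frontier:
--             return size
--         for x in frontier:
--             removed.add(x)
--         touched = []
--         for x in frontier:
--             for v in tree[x]:
--                 if v not in removed:
--                     deg[v] -= 1
--                     touched.append(v)
--         size -= len(frontier)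
--         frontier = [v for v in dict.fromkeys(touched) if deg[v] == 1]
--         rounds -= 1
--     return size
-- ===== Notes on version B (the rewrite author's own statement) =====
-- stated objective: faster
-- what changed: B replaces A's per-round full rescan and in-place rebuild of the dict by degree-counter leaf peeling: it keeps a degree map, a removed set and the current leaf frontier, and each round touches only the frontier's neighbourhoods (every adjacency list is scanned at most once overall) and stops as soon as no leaf is left; …
-- outside the precondition, e.g. on cf_748E({1: {2}, 2: {1, 3}, 3: {2}, 4: {5}, 5: {4, 6}, 6: {5}}, 1): A returns 2, B returns 2; on cf_748E({7: {8, 4, 5}, 3: {1, 2, 4}, 5: {4, 6}, 4: {6, 7}, 6: {6}, 9: {4}}, 4): A returns 4, B returns 3; on cf_748E({3: {5, 7}, 1: {2, 6}, 2: {4}, 4: {4, 7}}, 2): A returns 3, B raises KeyError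
import Mathlib
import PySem

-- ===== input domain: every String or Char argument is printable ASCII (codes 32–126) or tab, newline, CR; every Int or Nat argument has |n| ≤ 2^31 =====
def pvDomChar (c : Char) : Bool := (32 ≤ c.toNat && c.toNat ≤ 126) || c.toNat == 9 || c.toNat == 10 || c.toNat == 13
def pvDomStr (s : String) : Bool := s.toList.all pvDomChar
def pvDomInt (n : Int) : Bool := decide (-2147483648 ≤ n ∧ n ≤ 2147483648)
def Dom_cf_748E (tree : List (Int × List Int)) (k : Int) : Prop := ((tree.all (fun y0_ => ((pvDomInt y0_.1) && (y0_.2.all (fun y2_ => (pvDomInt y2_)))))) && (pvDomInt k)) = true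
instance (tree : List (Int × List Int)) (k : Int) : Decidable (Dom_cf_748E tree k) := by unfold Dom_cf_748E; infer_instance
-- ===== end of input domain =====

-- B replaces A's per-round rescan/rebuild of the dict by degree-counter leaf peeling over a
-- frontier (faster; each adjacency list is touched at most once overall).  Equivalence is about
-- the RETURN value: the Python A mutates its `tree` argument in place, B leaves it untouched.

-- Shared input conversion (the harness hands the Python function a dict[int, set[int]];
-- the association list is that dict in insertion order, each set's distinct elements as a list).
def pvToDict (tree : List (Int × List Int)) : PySem.Dict Int (PySem.Set Int) :=
  PySem.Dict.ofList (tree.map (fun p => (p.1, PySem.Set.ofList p.2)))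

-- ===== PORT A =====
-- `for _ in range(k)` is fuel recursion on k.toNat; `value.pop()` on a len-1 set yields its single
-- element (`headD 0`, exact for a singleton) and empties that set in tree (insert of the empty set);
-- `removed[value.pop()].append(key)` on the defaultdict(list) is Dict.modify with default [];
-- `tree[key].discard(val)` / `del tree[val]` raise KeyError in Python when the key is absent —
-- such inputs are outside Pre_cf_748E and the port totalises them with Dict.modify / Dict.erase.
def cf_748ERound (t : PySem.Dict Int (PySem.Set Int)) : PySem.Dict Int (PySem.Set Int) :=
  let st := t.items.foldl
    (fun (st : PySem.Dict Int (PySem.Set Int) × PySem.Dict Int (List Int)) kv =>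
      if PySem.Set.len kv.2 = 1 then
        (PySem.Dict.insert st.1 kv.1 PySem.Set.empty,
         PySem.Dict.modify st.2 (kv.2.headD 0) [] (· ++ [kv.1]))
      else st)
    (t, PySem.Dict.empty)
  st.2.items.foldl
    (fun tt kv => kv.2.foldl
      (fun tt2 v =>
        PySem.Dict.erase
          (PySem.Dict.modify tt2 kv.1 PySem.Set.empty (fun s => PySem.Set.discard s v)) v)
      tt)
    st.1

def cf_748ELoop : Nat → PySem.Dict Int (PySem.Set Int) → Int
  | 0, t => (PySem.Dict.size t : Int)
  | fuel+1, t =>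
    if PySem.Dict.size t = 1 ∨ PySem.Dict.size t = 2 then 0
    else cf_748ELoop fuel (cf_748ERound t)

def cf_748E (tree : List (Int × List Int)) (k : Int) : Int :=
  cf_748ELoop k.toNat (pvToDict tree)

-- ===== PORT B =====
-- Source B: `while rounds > 0` is fuel recursion on k.toNat; `deg[v] -= 1` raises KeyError in Python
-- on a missing key (outside Pre_cf_748E; totalised with getD/insert); `dict.fromkeys(touched)` is
-- PySem.List.dedup; the set iteration orders touched only in ways the returned int cannot see.
def cf_748EAltLoop (d : PySem.Dict Int (PySem.Set Int)) :
    Nat → PySem.Set Int → PySem.Dict Int Int → List Int → Int → Int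
  | 0, _, _, _, size => size
  | fuel+1, rem, deg, frontier, size =>
    if size = 1 ∨ size = 2 then 0
    else if frontier = [] then size
    else
      let rem' := frontier.foldl (fun r x => PySem.Set.add r x) rem
      let dt := frontier.foldl
        (fun (st : PySem.Dict Int Int × List Int) x =>
          (PySem.Dict.getD d x PySem.Set.empty).foldl
            (fun (st2 : PySem.Dict Int Int × List Int) v =>
              if PySem.Set.contains rem' v then st2
              else (PySem.Dict.insert st2.1 v (PySem.Dict.getD st2.1 v 0 - 1), st2.2 ++ [v]))
            st)
        (deg, ([] : List Int))
      let size' := size - (frontier.length : Int)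
      let frontier' := (PySem.List.dedup dt.2).filter (fun v => PySem.Dict.getD dt.1 v 0 == 1)
      cf_748EAltLoop d fuel rem' dt.1 frontier' size'

def cf_748E_alt (tree : List (Int × List Int)) (k : Int) : Int :=
  let d := pvToDict tree
  let deg := PySem.Dict.ofList (d.items.map (fun p => (p.1, (p.2.length : Int))))
  let frontier := deg.items.filterMap (fun p => if p.2 = 1 then some p.1 else none)
  cf_748EAltLoop d k.toNat PySem.Set.empty deg frontier (d.size : Int)

-- ===== PRECONDITION & SPEC =====
-- neighbour set of x (empty for a missing key)
def pvNb (d : PySem.Dict Int (PySem.Set Int)) (x : Int) : PySem.Set Int :=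
  PySem.Dict.getD d x PySem.Set.empty
-- one breadth step of reachability (used only by the connectivity test below)
def pvGrow (d : PySem.Dict Int (PySem.Set Int)) (s : List Int) : List Int :=
  s.foldl (fun acc x => PySem.Set.update acc (pvNb d x)) s
-- the graph is connected: every key is reached from the first key within size breadth steps
def pvConnB (d : PySem.Dict Int (PySem.Set Int)) : Prop :=
  d.keys ≠ [] ∧ ∀ y ∈ d.keys, y ∈ (pvGrow d)^[d.size] [d.keys.headD 0]
-- Pre_ excludes inputs on whose peeling A raises KeyError (a leaf's recorded neighbour missing
-- from the dict, or deleted earlier in the same round); that set is not closed-form, so Pre_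
-- conservatively admits the natural domain — a symmetric, self-loop-free, connected adjacency
-- dict — plus every input whose first round removes nothing (k ≤ 0, size 1 or 2, or no
-- singleton-valued key); a few crash-free malformed inputs are excluded with the crashing ones.
def Pre_cf_748E (tree : List (Int × List Int)) (k : Int) : Prop :=
  k ≤ 0 ∨ (pvToDict tree).size = 1 ∨ (pvToDict tree).size = 2 ∨
  (∀ p ∈ (pvToDict tree).items, PySem.Set.len p.2 ≠ 1) ∨
  ((∀ p ∈ (pvToDict tree).items, ∀ y ∈ p.2,
      y ≠ p.1 ∧ y ∈ (pvToDict tree).keys ∧ p.1 ∈ pvNb (pvToDict tree) y) ∧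
   pvConnB (pvToDict tree))

instance (tree : List (Int × List Int)) (k : Int) : Decidable (Pre_cf_748E tree k) := by
  unfold Pre_cf_748E pvConnB; infer_instance

def pvWitness_cf_748E : (List (Int × List Int)) × Int :=
  ([(1, [2]), (2, [1, 3]), (3, [2, 4]), (4, [3])], 2)

def Spec_cf_748E (tree : List (Int × List Int)) (k : Int) (out : Int) : Prop := out = cf_748E_alt tree k
instance (tree : List (Int × List Int)) (k : Int) (out : Int) : Decidable (Spec_cf_748E tree k out) := by unfold Spec_cf_748E; infer_instance

-- ===== CLAIM (what is proved, stated in full; the proofs are below) =====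
def Claim_equal_cf_748E : Prop := ∀ (tree : List (Int × List Int)) (k : Int), Dom_cf_748E tree k → Pre_cf_748E tree k → Spec_cf_748E tree k (cf_748E tree k)

-- ===== LEMMAS AND PROOFS =====

-- abbreviations used only by the proofs
def pvLeafB (t : PySem.Dict Int (PySem.Set Int)) (y : Int) : Bool := (pvNb t y).length == 1

def pvStep (t : PySem.Dict Int (PySem.Set Int)) (u v : Int) : Prop := v ∈ pvNb t u

-- the graph invariant carried through the rounds
def pvGood (t : PySem.Dict Int (PySem.Set Int)) : Prop :=
  t.keys.Nodup ∧
  (∀ x, (pvNb t x).Nodup) ∧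
  (∀ x y, y ∈ pvNb t x → y ∈ t.keys ∧ y ≠ x ∧ x ∈ pvNb t y) ∧
  (∀ x y, x ∈ t.keys → y ∈ t.keys → Relation.ReflTransGen (pvStep t) x y)

-- ---------- S1: small dictionary facts ----------
theorem pvGet?_erase {ν : Type} (d : PySem.Dict Int ν) (k y : Int) :
    (PySem.Dict.erase d k).get? y = if y = k then none else d.get? y := by
  rcases d with ⟨l⟩
  simp only [PySem.Dict.erase, PySem.Dict.get?]
  by_cases hyk : y = k
  · subst hyk
    rw [if_pos rfl, List.find?_eq_none.2, Option.map_none]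
    intro p hp
    have := (List.mem_filter.1 hp).2
    simp_all
  · rw [if_neg hyk]
    congr 1
    induction l with
    | nil => rfl
    | cons p l ih =>
      by_cases hk : p.1 = k
      · have h2 : (p.1 == y) = false := by subst hk; simp; omega
        have h3 : (k == y) = false := by simp; omega
        simp [List.filter_cons, hk, List.find?_cons, h2, h3, ih]
      · by_cases hy : p.1 = y
        · simp [List.filter_cons, hk, List.find?_cons, hy, hyk]
        · simp [List.filter_cons, hk, List.find?_cons, hy, hyk, ih]

theorem pvKeys_erase {ν : Type} (d : PySem.Dict Int ν) (k : Int) :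
    (PySem.Dict.erase d k).keys = d.keys.filter (fun y => !(y == k)) := by
  rcases d with ⟨l⟩
  simp only [PySem.Dict.erase, PySem.Dict.keys]
  induction l with
  | nil => simp
  | cons p l ih => by_cases hk : p.1 = k <;> simp [List.filter_cons, hk, ih]

theorem pvGet?_modify {ν : Type} (d : PySem.Dict Int ν) (k y : Int) (d0 : ν) (f : ν → ν) :
    (d.modify k d0 f).get? y = if y = k then some (f (d.getD k d0)) else d.get? y := by
  simp [PySem.Dict.modify, PySem.Dict.get?_insert]

theorem pvKeys_modify_of_mem {ν : Type} (d : PySem.Dict Int ν) (k : Int) (d0 : ν) (f : ν → ν)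
    (h : k ∈ d.keys) : (d.modify k d0 f).keys = d.keys := by
  rw [PySem.Dict.keys_modify]
  exact PySem.Dict.keys_insert_of_contains _ _ (by
    simpa [PySem.Dict.contains_iff_mem_keys] using h)

theorem pvNb_eq_of_get? (t : PySem.Dict Int (PySem.Set Int)) {x : Int} {s : PySem.Set Int}
    (h : t.get? x = some s) : pvNb t x = s := by
  simp [pvNb, PySem.Dict.getD_eq_get?_getD, h]

theorem pvNb_of_not_mem (t : PySem.Dict Int (PySem.Set Int)) {x : Int}
    (h : x ∉ t.keys) : pvNb t x = [] := by
  unfold pvNb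
  rcases hg : t.get? x with _ | s
  · simp [PySem.Dict.getD_eq_get?_getD, hg, PySem.Set.empty]
  · exact absurd (PySem.Dict.mem_keys_of_mem_items t (PySem.Dict.mem_items_of_get?_eq_some _ hg)) h

theorem pvMem_keys_of_nb_ne_nil (t : PySem.Dict Int (PySem.Set Int)) {x : Int}
    (h : pvNb t x ≠ []) : x ∈ t.keys := by
  by_contra hx; exact h (pvNb_of_not_mem t hx)

theorem pvGet?_of_mem (t : PySem.Dict Int (PySem.Set Int)) (hnd : t.keys.Nodup) {x : Int}
    (h : x ∈ t.keys) : t.get? x = some (pvNb t x) := by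
  rcases hg : t.get? x with _ | s
  · exact absurd (by simpa [PySem.Dict.get?_eq_none_iff_not_mem_keys] using hg) (by simpa using h)
  · rw [pvNb_eq_of_get? t hg]

-- ---------- S2: graph facts under the invariant ----------
theorem pvList_len1 (s : List Int) (h : s.length = 1) : s = [s.headD 0] := by
  match s with
  | [a] => rfl
  | [] => simp at h
  | a :: b :: r => simp at h

theorem pvLeaf_nb (t : PySem.Dict Int (PySem.Set Int)) {x : Int}
    (h : pvLeafB t x = true) : pvNb t x = [(pvNb t x).headD 0] :=
  pvList_len1 _ (by simpa [pvLeafB] using h)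

theorem pvLeaf_nb_eq_of_mem (t : PySem.Dict Int (PySem.Set Int)) {x y : Int}
    (h : pvLeafB t x = true) (hy : y ∈ pvNb t x) : pvNb t x = [y] := by
  have h1 := pvLeaf_nb t h
  have h2 : y = (pvNb t x).headD 0 := by rw [h1] at hy; simpa using hy
  rw [h1, h2]

theorem pvSize_eq_keys_length (t : PySem.Dict Int (PySem.Set Int)) :
    t.size = t.keys.length := by
  simp [PySem.Dict.size, PySem.Dict.keys]

-- no two adjacent leaves while at least three nodes remain
theorem pvNoMutual (t : PySem.Dict Int (PySem.Set Int)) (hG : pvGood t) (h3 : 3 ≤ t.size)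
    {x y : Int} (hx : x ∈ t.keys) (hlx : pvLeafB t x = true) (hyx : y ∈ pvNb t x) :
    pvLeafB t y = false := by
  obtain ⟨hnd, hvn, hsym, hconn⟩ := hG
  by_contra hly
  have hly : pvLeafB t y = true := by revert hly; cases pvLeafB t y <;> simp
  obtain ⟨hyk, hyx', hxy⟩ := hsym x y hyx
  have hnbx : pvNb t x = [y] := pvLeaf_nb_eq_of_mem t hlx hyx
  have hnby : pvNb t y = [x] := pvLeaf_nb_eq_of_mem t hly hxy
  have hclosed : ∀ z, Relation.ReflTransGen (pvStep t) x z → z = x ∨ z = y := by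
    intro z hz
    induction hz with
    | refl => exact Or.inl rfl
    | tail _ hstep ih =>
      rename_i b c _
      rcases ih with hb | hb
      · subst hb; right; simpa [pvStep, hnbx] using hstep
      · subst hb; left; simpa [pvStep, hnby] using hstep
  have hsub : t.keys ⊆ [x, y] := by
    intro z hz
    rcases hclosed z (hconn x z hx hz) with h | h <;> simp [h]
  have := List.Subperm.length_le (List.subperm_of_subset hnd hsub)
  rw [pvSize_eq_keys_length] at h3
  simp at this
  omega

-- a leaf's unique neighbour survives the round
theorem pvSurvivor (t : PySem.Dict Int (PySem.Set Int)) (hG : pvGood t) (h3 : 3 ≤ t.size)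
    {x : Int} (hx : x ∈ t.keys) (hlx : pvLeafB t x = true) :
    ∃ v ∈ t.keys, pvLeafB t v = false := by
  have hmem : (pvNb t x).headD 0 ∈ pvNb t x := by rw [pvLeaf_nb t hlx]; simp
  exact ⟨(pvNb t x).headD 0, (hG.2.2.1 x _ hmem).1, pvNoMutual t hG h3 hx hlx hmem⟩

-- removing all leaves keeps the remaining graph connected (walk-shortcut helper first)
theorem pvShortcut (t t' : PySem.Dict Int (PySem.Set Int))
    (hsym : ∀ x y, y ∈ pvNb t x → y ∈ t.keys ∧ y ≠ x ∧ x ∈ pvNb t y)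
    (hk : ∀ y, y ∈ t'.keys ↔ y ∈ t.keys ∧ pvLeafB t y = false)
    (hn : ∀ y z, y ∈ t'.keys → (z ∈ pvNb t' y ↔ z ∈ pvNb t y ∧ pvLeafB t z = false))
    (v : Int) (hv : v ∈ t'.keys) :
    ∀ n u l, l.length ≤ n → u ∈ t'.keys → List.IsChain (pvStep t) (u :: l) →
      (u :: l).getLast (List.cons_ne_nil _ _) = v →
      Relation.ReflTransGen (pvStep t') u v := by
  intro n
  induction n with
  | zero =>
    intro u l hl hu hc hlast
    have : l = [] := by cases l <;> simp_all
    subst this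
    simp at hlast
    exact hlast ▸ Relation.ReflTransGen.refl
  | succ n ih =>
    intro u l hl hu hc hlast
    match l, hl, hc, hlast with
    | [], _, _, hlast =>
      simp at hlast
      exact hlast ▸ Relation.ReflTransGen.refl
    | w :: l', hl, hc, hlast =>
      have hstep : w ∈ pvNb t u := (List.isChain_cons.1 hc).1 w (by simp)
      have hwk : w ∈ t.keys := (hsym u w hstep).1
      by_cases hlw : pvLeafB t w = false
      · have hw' : w ∈ t'.keys := (hk w).2 ⟨hwk, hlw⟩
        refine Relation.ReflTransGen.head
          (show pvStep t' u w from (hn u w hu).2 ⟨hstep, hlw⟩) ?_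
        refine ih w l' (by simpa using hl) hw' (List.isChain_cons.1 hc).2 ?_
        rw [List.getLast_cons_cons] at hlast
        exact hlast
      · have hlw : pvLeafB t w = true := by revert hlw; cases pvLeafB t w <;> simp
        have hnbw : pvNb t w = [u] := pvLeaf_nb_eq_of_mem t hlw (hsym u w hstep).2.2
        match l', hl, hc, hlast with
        | [], _, _, hlast =>
          have hwv : w = v := by simpa using hlast
          subst hwv
          rw [((hk w).1 hv).2] at hlw
          simp at hlw
        | w₂ :: l'', hl, hc, hlast =>
          have hw2 : w₂ = u := by
            have := (List.isChain_cons.1 (List.isChain_cons.1 hc).2).1 w₂ (by simp)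
            simpa [pvStep, hnbw] using this
          subst hw2
          refine ih w₂ l'' (by simp at hl ⊢; omega) hu
            (List.isChain_cons.1 (List.isChain_cons.1 hc).2).2 ?_
          rw [List.getLast_cons_cons, List.getLast_cons_cons] at hlast
          exact hlast

theorem pvConnPreserved (t t' : PySem.Dict Int (PySem.Set Int)) (hG : pvGood t)
    (hk : ∀ y, y ∈ t'.keys ↔ y ∈ t.keys ∧ pvLeafB t y = false)
    (hn : ∀ y z, y ∈ t'.keys → (z ∈ pvNb t' y ↔ z ∈ pvNb t y ∧ pvLeafB t z = false)) :
    ∀ u v, u ∈ t'.keys → v ∈ t'.keys → Relation.ReflTransGen (pvStep t') u v := by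
  obtain ⟨hnd, hvn, hsym, hconn⟩ := hG
  intro u v hu hv
  obtain ⟨l, hlc, hll⟩ := List.exists_isChain_cons_of_relationReflTransGen
    (hconn u v ((hk u).1 hu).1 ((hk v).1 hv).1)
  exact pvShortcut t t' hsym hk hn v hv l.length u l le_rfl hu hlc hll

-- ---------- S3: characterising A's round ----------
theorem pvItems_snd (t : PySem.Dict Int (PySem.Set Int)) (hnd : t.keys.Nodup)
    {kv : Int × PySem.Set Int} (h : kv ∈ t.items) : kv.2 = pvNb t kv.1 :=
  (PySem.Dict.getD_of_mem_items t (by exact h) hnd PySem.Set.empty).symm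

theorem pvLeaf_iff_items (t : PySem.Dict Int (PySem.Set Int)) (hnd : t.keys.Nodup) (x : Int) :
    (∃ kv ∈ t.items, kv.1 = x ∧ PySem.Set.len kv.2 = 1) ↔ (x ∈ t.keys ∧ pvLeafB t x = true) := by
  constructor
  · rintro ⟨kv, hkv, rfl, hlen⟩
    refine ⟨PySem.Dict.mem_keys_of_mem_items t hkv, ?_⟩
    have h2 := pvItems_snd t hnd hkv
    simp only [PySem.Set.len] at hlen
    simp [pvLeafB, ← h2]
    omega
  · rintro ⟨hx, hleaf⟩
    refine ⟨(x, pvNb t x), ?_, rfl, ?_⟩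
    · exact PySem.Dict.mem_items_of_get?_eq_some _ (pvGet?_of_mem t hnd hx)
    · simp only [PySem.Set.len]
      simp [pvLeafB] at hleaf
      omega

theorem pvLoop1_get (l : List (Int × PySem.Set Int)) (a : PySem.Dict Int (PySem.Set Int)) (x : Int) :
    (l.foldl (fun a kv => if PySem.Set.len kv.2 = 1
        then PySem.Dict.insert a kv.1 PySem.Set.empty else a) a).get? x
      = if ∃ kv ∈ l, kv.1 = x ∧ PySem.Set.len kv.2 = 1 then some PySem.Set.empty
        else a.get? x := by
  induction l generalizing a with
  | nil => simp
  | cons kv l ih =>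
    simp only [List.foldl_cons]
    rw [ih]
    by_cases hex : ∃ q ∈ l, q.1 = x ∧ PySem.Set.len q.2 = 1
    · rw [if_pos hex, if_pos (by obtain ⟨q, hq, h⟩ := hex; exact ⟨q, List.mem_cons_of_mem _ hq, h⟩)]
    · rw [if_neg hex]
      by_cases hc : PySem.Set.len kv.2 = 1
      · by_cases hx : kv.1 = x
        · rw [if_pos hc, if_pos ⟨kv, by simp, hx, hc⟩]
          subst hx
          exact PySem.Dict.get?_insert_self a kv.1 _
        · have hno : ¬ ∃ q ∈ kv :: l, q.1 = x ∧ PySem.Set.len q.2 = 1 := by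
            rintro ⟨q, hq, h1, h2⟩
            rcases List.mem_cons.1 hq with rfl | hq
            · exact hx h1
            · exact hex ⟨q, hq, h1, h2⟩
          rw [if_pos hc, if_neg hno, PySem.Dict.get?_insert, if_neg (fun h => hx h.symm)]
      · have hno : ¬ ∃ q ∈ kv :: l, q.1 = x ∧ PySem.Set.len q.2 = 1 := by
          rintro ⟨q, hq, h1, h2⟩
          rcases List.mem_cons.1 hq with rfl | hq
          · exact hc h2
          · exact hex ⟨q, hq, h1, h2⟩
        rw [if_neg hc, if_neg hno]

theorem pvLoop1_keys (l : List (Int × PySem.Set Int)) (a : PySem.Dict Int (PySem.Set Int))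
    (hl : ∀ kv ∈ l, kv.1 ∈ a.keys) :
    (l.foldl (fun a kv => if PySem.Set.len kv.2 = 1
        then PySem.Dict.insert a kv.1 PySem.Set.empty else a) a).keys = a.keys := by
  induction l generalizing a with
  | nil => rfl
  | cons kv l ih =>
    simp only [List.foldl_cons]
    by_cases hc : PySem.Set.len kv.2 = 1
    · rw [if_pos hc]
      have hk : (PySem.Dict.insert a kv.1 PySem.Set.empty).keys = a.keys :=
        PySem.Dict.keys_insert_of_contains a _
          (by simpa [PySem.Dict.contains_iff_mem_keys] using hl kv (by simp))
      rw [ih _ (by rw [hk]; exact fun q hq => hl q (by simp [hq])), hk]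
    · rw [if_neg hc]
      exact ih a (fun q hq => hl q (by simp [hq]))

-- the `removed` buckets: (target, leaf) pairs in item order
def pvPairs (t : PySem.Dict Int (PySem.Set Int)) : List (Int × Int) :=
  (t.items.filter (fun kv => decide (PySem.Set.len kv.2 = 1))).map (fun kv => (kv.2.headD 0, kv.1))

theorem pvRemoved_eq (t : PySem.Dict Int (PySem.Set Int)) :
    t.items.foldl (fun b kv => if PySem.Set.len kv.2 = 1
        then b.modify (kv.2.headD 0) [] (· ++ [kv.1]) else b) PySem.Dict.empty
      = (pvPairs t).foldl (fun b p => b.modify p.1 [] (· ++ [p.2])) PySem.Dict.empty := by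
  refine (PySem.List.foldl_ite_eq_foldl_filter (fun kv => PySem.Set.len kv.2 = 1)
    (fun b kv => b.modify (kv.2.headD 0) [] (· ++ [kv.1])) t.items PySem.Dict.empty).trans ?_
  rw [pvPairs, List.foldl_map]

-- one `tree[key].discard(val); del tree[val]` step of the second loop
def pvStep2 (tt : PySem.Dict Int (PySem.Set Int)) (p : Int × Int) :
    PySem.Dict Int (PySem.Set Int) :=
  PySem.Dict.erase (PySem.Dict.modify tt p.1 PySem.Set.empty (fun s => PySem.Set.discard s p.2)) p.2

theorem pvStep2_fold (ps : List (Int × Int)) (a : PySem.Dict Int (PySem.Set Int))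
    (hnd : a.keys.Nodup)
    (hvx : ∀ p ∈ ps, p.1 ∉ ps.map (·.2))
    (hcont : ∀ p ∈ ps, p.1 ∈ a.keys) :
    (∀ y, (ps.foldl pvStep2 a).get? y =
        if y ∈ ps.map (·.2) then none
        else (a.get? y).map (fun s => s.filter (fun z => !(decide ((y, z) ∈ ps)))))
    ∧ (ps.foldl pvStep2 a).keys = a.keys.filter (fun y => !(decide (y ∈ ps.map (·.2)))) := by
  induction ps generalizing a with
  | nil =>
    constructor
    · intro y
      simp only [List.foldl_nil, List.map_nil, List.not_mem_nil, if_neg (fun h => h)]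
      rcases a.get? y with _ | s <;> simp
    · simp [List.filter_eq_self]
  | cons p ps ih =>
    have hp1 : p.1 ∈ a.keys := hcont p (by simp)
    have hp12 : p.1 ≠ p.2 := by
      intro h
      exact hvx p (by simp) (by simp [← h])
    obtain ⟨s0, hs0⟩ : ∃ s, a.get? p.1 = some s := by
      rcases hg : a.get? p.1 with _ | s
      · exact absurd (by simpa [PySem.Dict.get?_eq_none_iff_not_mem_keys] using hg)
          (by simpa using hp1)
      · exact ⟨s, rfl⟩
    have hmodk : (PySem.Dict.modify a p.1 PySem.Set.empty
        (fun s => PySem.Set.discard s p.2)).keys = a.keys :=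
      pvKeys_modify_of_mem a p.1 _ _ hp1
    have hak : (pvStep2 a p).keys = a.keys.filter (fun y => !(y == p.2)) := by
      rw [pvStep2, pvKeys_erase, hmodk]
    have hag : ∀ y, (pvStep2 a p).get? y = if y = p.2 then none
        else if y = p.1 then some (PySem.Set.discard s0 p.2) else a.get? y := by
      intro y
      rw [pvStep2, pvGet?_erase]
      by_cases h2 : y = p.2
      · simp [h2]
      · rw [if_neg h2, if_neg h2, pvGet?_modify]
        by_cases h1 : y = p.1
        · rw [if_pos h1, if_pos h1]
          congr 1
          simp [PySem.Dict.getD_eq_get?_getD, hs0]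
        · rw [if_neg h1, if_neg h1]
    obtain ⟨ihg, ihk⟩ := ih (pvStep2 a p)
      (by rw [hak]; exact hnd.filter _)
      (by intro q hq
          have := hvx q (by simp [hq])
          simp only [List.map_cons, List.mem_cons] at this
          push_neg at this
          exact fun hm => this.2 hm)
      (by intro q hq
          have hq1 : q.1 ∈ a.keys := hcont q (by simp [hq])
          have hqne : q.1 ≠ p.2 := by
            have := hvx q (by simp [hq])
            simp only [List.map_cons, List.mem_cons] at this
            push_neg at this
            exact this.1
          rw [hak, List.mem_filter]
          exact ⟨hq1, by simpa using hqne⟩)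
    constructor
    · intro y
      simp only [List.foldl_cons]
      rw [ihg y]
      by_cases hyt : y ∈ ps.map (·.2)
      · rw [if_pos hyt, if_pos (by simp only [List.map_cons, List.mem_cons]; exact Or.inr hyt)]
      · rw [if_neg hyt]
        by_cases hy2 : y = p.2
        · rw [if_pos (by simp only [List.map_cons, List.mem_cons]; exact Or.inl hy2)]
          rw [hag y, if_pos hy2]
          rfl
        · rw [if_neg (by simp only [List.map_cons, List.mem_cons]; rintro (h | h); exacts [hy2 h, hyt h])]
          rw [hag y, if_neg hy2]
          by_cases hy1 : y = p.1
          · rw [if_pos hy1, hy1, hs0]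
            simp only [Option.map_some]
            congr 1
            rw [PySem.Set.discard, List.filter_filter]
            refine List.filter_congr ?_
            intro z hz
            have hiff : ((p.1, z) ∈ p :: ps) ↔ (z = p.2 ∨ (p.1, z) ∈ ps) := by
              simp only [List.mem_cons]
              constructor
              · rintro (h | h)
                · exact Or.inl (congrArg Prod.snd h)
                · exact Or.inr h
              · rintro (h | h)
                · exact Or.inl (by rw [h])
                · exact Or.inr h
            by_cases h2 : z = p.2 <;> by_cases hps : (p.1, z) ∈ ps <;>
              simp [h2, hps, hiff]
          · rw [if_neg hy1]
            rcases a.get? y with _ | s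
            · rfl
            · simp only [Option.map_some]
              congr 1
              refine List.filter_congr ?_
              intro z hz
              have : ((y, z) ∈ p :: ps) ↔ ((y, z) ∈ ps) := by
                simp only [List.mem_cons]
                constructor
                · rintro (h | h)
                  · exact absurd (congrArg Prod.fst h) hy1
                  · exact h
                · exact Or.inr
              simp [this]
    · simp only [List.foldl_cons]
      rw [ihk, hak, List.filter_filter]
      refine List.filter_congr ?_
      intro y hy
      simp only [List.map_cons, List.mem_cons]
      by_cases h2 : y = p.2 <;> by_cases ht : y ∈ ps.map (·.2) <;> simp [h2, ht]

-- the two independent accumulators of A's first loop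
theorem pvSt_split (t : PySem.Dict Int (PySem.Set Int)) :
    t.items.foldl
      (fun (st : PySem.Dict Int (PySem.Set Int) × PySem.Dict Int (List Int)) kv =>
        if PySem.Set.len kv.2 = 1 then
          (PySem.Dict.insert st.1 kv.1 PySem.Set.empty,
           PySem.Dict.modify st.2 (kv.2.headD 0) [] (· ++ [kv.1]))
        else st)
      (t, PySem.Dict.empty)
    = (t.items.foldl (fun a kv => if PySem.Set.len kv.2 = 1
          then PySem.Dict.insert a kv.1 PySem.Set.empty else a) t,
       t.items.foldl (fun b kv => if PySem.Set.len kv.2 = 1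
          then b.modify (kv.2.headD 0) [] (· ++ [kv.1]) else b) PySem.Dict.empty) := by
  have hsplit : (fun (st : PySem.Dict Int (PySem.Set Int) × PySem.Dict Int (List Int)) kv =>
        if PySem.Set.len kv.2 = 1 then
          (PySem.Dict.insert st.1 kv.1 PySem.Set.empty,
           PySem.Dict.modify st.2 (kv.2.headD 0) [] (· ++ [kv.1]))
        else st)
      = (fun (st : PySem.Dict Int (PySem.Set Int) × PySem.Dict Int (List Int))
          (kv : Int × PySem.Set Int) =>
          (if PySem.Set.len kv.2 = 1
             then PySem.Dict.insert st.1 kv.1 PySem.Set.empty else st.1,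
           if PySem.Set.len kv.2 = 1
             then PySem.Dict.modify st.2 (kv.2.headD 0) [] (· ++ [kv.1]) else st.2)) := by
    funext st kv
    by_cases hc : PySem.Set.len kv.2 = 1
    · rw [if_pos hc, if_pos hc, if_pos hc]
    · rw [if_neg hc, if_neg hc, if_neg hc]
  rw [hsplit, PySem.List.foldl_prod_mk
    (fun a (kv : Int × PySem.Set Int) => if PySem.Set.len kv.2 = 1
      then PySem.Dict.insert a kv.1 PySem.Set.empty else a)
    (fun b (kv : Int × PySem.Set Int) => if PySem.Set.len kv.2 = 1
      then PySem.Dict.modify b (kv.2.headD 0) [] (· ++ [kv.1]) else b)]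

def pvT1 (t : PySem.Dict Int (PySem.Set Int)) : PySem.Dict Int (PySem.Set Int) :=
  t.items.foldl (fun a kv => if PySem.Set.len kv.2 = 1
    then PySem.Dict.insert a kv.1 PySem.Set.empty else a) t

def pvR (t : PySem.Dict Int (PySem.Set Int)) : PySem.Dict Int (List Int) :=
  (pvPairs t).foldl (fun b p => b.modify p.1 [] (· ++ [p.2])) PySem.Dict.empty

def pvQ (R : PySem.Dict Int (List Int)) : List (Int × Int) :=
  R.items.flatMap (fun kv => kv.2.map (fun v => (kv.1, v)))

theorem pvRound_eq (t : PySem.Dict Int (PySem.Set Int)) :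
    cf_748ERound t = (pvQ (pvR t)).foldl pvStep2 (pvT1 t) := by
  have hz : cf_748ERound t =
      (t.items.foldl
        (fun (st : PySem.Dict Int (PySem.Set Int) × PySem.Dict Int (List Int)) kv =>
          if PySem.Set.len kv.2 = 1 then
            (PySem.Dict.insert st.1 kv.1 PySem.Set.empty,
             PySem.Dict.modify st.2 (kv.2.headD 0) [] (· ++ [kv.1]))
          else st)
        (t, PySem.Dict.empty)).2.items.foldl
        (fun tt kv => kv.2.foldl
          (fun tt2 v => PySem.Dict.erase
            (PySem.Dict.modify tt2 kv.1 PySem.Set.empty (fun s => PySem.Set.discard s v)) v) tt)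
        (t.items.foldl
          (fun (st : PySem.Dict Int (PySem.Set Int) × PySem.Dict Int (List Int)) kv =>
            if PySem.Set.len kv.2 = 1 then
              (PySem.Dict.insert st.1 kv.1 PySem.Set.empty,
               PySem.Dict.modify st.2 (kv.2.headD 0) [] (· ++ [kv.1]))
            else st)
          (t, PySem.Dict.empty)).1 := rfl
  rw [hz, pvSt_split, pvRemoved_eq]
  rw [pvQ, List.foldl_flatMap]
  simp only [List.foldl_map]
  rfl

theorem pvGet?_isSome {ν : Type} (d : PySem.Dict Int ν) {x : Int} (h : x ∈ d.keys) :
    ∃ v, d.get? x = some v := by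
  rcases hg : d.get? x with _ | v
  · exact absurd (by simpa [PySem.Dict.get?_eq_none_iff_not_mem_keys] using hg) (by simpa using h)
  · exact ⟨v, rfl⟩

-- membership in the (target, leaf) pair list
theorem pvMem_pvPairs (t : PySem.Dict Int (PySem.Set Int)) (hnd : t.keys.Nodup) (v x : Int) :
    (v, x) ∈ pvPairs t ↔ (x ∈ t.keys ∧ pvLeafB t x = true ∧ (pvNb t x).headD 0 = v) := by
  rw [pvPairs]
  constructor
  · intro h
    obtain ⟨kv, hkv, hke⟩ := List.mem_map.1 h
    obtain ⟨hkv', hlen⟩ := List.mem_filter.1 hkv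
    have h2 := pvItems_snd t hnd hkv'
    have hx : kv.1 = x := congrArg Prod.snd hke
    have hv : kv.2.headD 0 = v := congrArg Prod.fst hke
    subst hx
    refine ⟨PySem.Dict.mem_keys_of_mem_items t hkv', ?_, by rw [← h2, hv]⟩
    simp only [PySem.Set.len, decide_eq_true_eq] at hlen
    simp [pvLeafB, ← h2]
    omega
  · rintro ⟨hx, hleaf, hv⟩
    refine List.mem_map.2 ⟨(x, pvNb t x), List.mem_filter.2 ⟨?_, ?_⟩,
      by simp only [Prod.ext_iff]; exact ⟨hv, trivial⟩⟩
    · exact PySem.Dict.mem_items_of_get?_eq_some _ (pvGet?_of_mem t hnd hx)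
    · simp only [PySem.Set.len, decide_eq_true_eq]
      simp [pvLeafB] at hleaf
      omega

-- membership in the flattened bucket list equals membership in the pair list
theorem pvKeys_pvR (t : PySem.Dict Int (PySem.Set Int)) :
    (pvR t).keys = PySem.Set.ofList ((pvPairs t).map (fun p => p.1)) := by
  rw [pvR, PySem.Dict.keys_foldl_modify_key (pvPairs t) (fun p => p.1) []
    (fun _ p => (· ++ [p.2])) PySem.Dict.empty]
  rw [show PySem.Dict.empty.keys = ([] : List Int) from rfl, PySem.Set.update_nil_left]

theorem pvNodup_keys_pvR (t : PySem.Dict Int (PySem.Set Int)) : (pvR t).keys.Nodup := by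
  rw [pvKeys_pvR]
  exact PySem.Set.nodup_ofList _

theorem pvGetD_pvR (t : PySem.Dict Int (PySem.Set Int)) (c : Int) :
    (pvR t).getD c [] = ((pvPairs t).filter (fun p => p.1 == c)).map (fun p => p.2) := by
  rw [pvR, PySem.Dict.getD_foldl_modify_append (pvPairs t) PySem.Dict.empty c]
  simp

theorem pvMem_pvQ (t : PySem.Dict Int (PySem.Set Int)) (y z : Int) :
    ((y, z) ∈ pvQ (pvR t)) ↔ ((y, z) ∈ pvPairs t) := by
  constructor
  · intro h
    obtain ⟨kv, hkv, hm⟩ := List.mem_flatMap.1 h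
    obtain ⟨w, hw, he⟩ := List.mem_map.1 hm
    have hy : y = kv.1 := (congrArg Prod.fst he).symm
    have hz : z = w := (congrArg Prod.snd he).symm
    rw [hy, hz]
    have hval := PySem.Dict.getD_of_mem_items (pvR t) hkv (pvNodup_keys_pvR t) []
    rw [← hval, pvGetD_pvR] at hw
    obtain ⟨q, hq, hqe⟩ := List.mem_map.1 hw
    obtain ⟨hq', hq1⟩ := List.mem_filter.1 hq
    have : q = (kv.1, w) := Prod.ext (by simpa using hq1) hqe
    rwa [this] at hq'
  · intro h
    have hyk : y ∈ (pvR t).keys := by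
      rw [pvKeys_pvR]
      rw [PySem.Set.mem_ofList]
      exact List.mem_map.2 ⟨(y, z), h, rfl⟩
    obtain ⟨v, hv⟩ := pvGet?_isSome (pvR t) hyk
    have hvd : (pvR t).getD y [] = v := by simp [PySem.Dict.getD_eq_get?_getD, hv]
    have hzv : z ∈ v := by
      rw [← hvd, pvGetD_pvR]
      exact List.mem_map.2 ⟨(y, z), List.mem_filter.2 ⟨h, by simp⟩, rfl⟩
    exact List.mem_flatMap.2 ⟨(y, v), PySem.Dict.mem_items_of_get?_eq_some _ hv,
      List.mem_map.2 ⟨z, hzv, rfl⟩⟩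

-- ---------- S4: the round spec ----------
theorem pvT1_keys (t : PySem.Dict Int (PySem.Set Int)) : (pvT1 t).keys = t.keys :=
  pvLoop1_keys t.items t (fun kv hkv => PySem.Dict.mem_keys_of_mem_items t hkv)

theorem pvT1_get (t : PySem.Dict Int (PySem.Set Int)) (hnd : t.keys.Nodup) (x : Int) :
    (pvT1 t).get? x = if x ∈ t.keys ∧ pvLeafB t x = true then some PySem.Set.empty
      else t.get? x := by
  rw [pvT1, pvLoop1_get]
  exact if_congr (pvLeaf_iff_items t hnd x) rfl rfl

theorem pvMem_snd_pvQ (t : PySem.Dict Int (PySem.Set Int)) (hnd : t.keys.Nodup) (z : Int) :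
    (z ∈ (pvQ (pvR t)).map (·.2)) ↔ (z ∈ t.keys ∧ pvLeafB t z = true) := by
  rw [List.mem_map]
  constructor
  · rintro ⟨q, hq, rfl⟩
    have : (q.1, q.2) ∈ pvQ (pvR t) := hq
    have := (pvMem_pvQ t q.1 q.2).1 this
    have := (pvMem_pvPairs t hnd q.1 q.2).1 this
    exact ⟨this.1, this.2.1⟩
  · rintro ⟨hz, hlz⟩
    refine ⟨((pvNb t z).headD 0, z), ?_, rfl⟩
    exact (pvMem_pvQ t _ z).2 ((pvMem_pvPairs t hnd _ z).2 ⟨hz, hlz, rfl⟩)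

theorem pvRound_spec (t : PySem.Dict Int (PySem.Set Int)) (hG : pvGood t) (h3 : 3 ≤ t.size) :
    ((cf_748ERound t).keys = t.keys.filter (fun y => !pvLeafB t y)) ∧
    (∀ y, (cf_748ERound t).get? y =
      if y ∈ t.keys ∧ pvLeafB t y = false
      then some ((pvNb t y).filter (fun z => !pvLeafB t z)) else none) := by
  have hnd := hG.1
  have hsym := hG.2.2.1
  have hvx : ∀ q ∈ pvQ (pvR t), q.1 ∉ (pvQ (pvR t)).map (·.2) := by
    rintro q hq hq1
    have hp := (pvMem_pvPairs t hnd q.1 q.2).1 ((pvMem_pvQ t q.1 q.2).1 hq)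
    have hq1' := (pvMem_snd_pvQ t hnd q.1).1 hq1
    have hmem : q.1 ∈ pvNb t q.2 := by
      rw [pvLeaf_nb t hp.2.1, hp.2.2]
      simp
    have := pvNoMutual t hG h3 hp.1 hp.2.1 hmem
    rw [hq1'.2] at this
    simp at this
  have hcont : ∀ q ∈ pvQ (pvR t), q.1 ∈ (pvT1 t).keys := by
    intro q hq
    have hp := (pvMem_pvPairs t hnd q.1 q.2).1 ((pvMem_pvQ t q.1 q.2).1 hq)
    have hmem : q.1 ∈ pvNb t q.2 := by
      rw [pvLeaf_nb t hp.2.1, hp.2.2]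
      simp
    rw [pvT1_keys]
    exact (hsym q.2 q.1 hmem).1
  obtain ⟨hg, hk⟩ := pvStep2_fold (pvQ (pvR t)) (pvT1 t)
    (by rw [pvT1_keys]; exact hnd) hvx hcont
  rw [pvRound_eq]
  constructor
  · rw [hk, pvT1_keys]
    refine List.filter_congr ?_
    intro y hy
    by_cases hl : pvLeafB t y = true
    · simp [hl, (pvMem_snd_pvQ t hnd y).2 ⟨hy, hl⟩]
    · have hl' : pvLeafB t y = false := by revert hl; cases pvLeafB t y <;> simp
      have : y ∉ (pvQ (pvR t)).map (·.2) := by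
        intro hm
        rw [((pvMem_snd_pvQ t hnd y).1 hm).2] at hl'
        simp at hl'
      simp [hl', this]
  · intro y
    rw [hg y]
    by_cases hyq : y ∈ (pvQ (pvR t)).map (·.2)
    · rw [if_pos hyq]
      have := (pvMem_snd_pvQ t hnd y).1 hyq
      rw [if_neg (by rintro ⟨_, hfalse⟩; rw [this.2] at hfalse; simp at hfalse)]
    · rw [if_neg hyq, pvT1_get t hnd y]
      have hnl : ¬ (y ∈ t.keys ∧ pvLeafB t y = true) := by
        intro h
        exact hyq ((pvMem_snd_pvQ t hnd y).2 h)
      rw [if_neg hnl]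
      by_cases hy : y ∈ t.keys
      · have hl' : pvLeafB t y = false := by
          rcases Bool.eq_false_or_eq_true (pvLeafB t y) with h | h
          · exact absurd ⟨hy, h⟩ hnl
          · exact h
        rw [if_pos ⟨hy, hl'⟩, pvGet?_of_mem t hnd hy]
        simp only [Option.map_some]
        congr 1
        refine List.filter_congr ?_
        intro z hz
        obtain ⟨hzk, hzy, hyz⟩ := hsym y z hz
        by_cases hlz : pvLeafB t z = true
        · have : (y, z) ∈ pvQ (pvR t) :=
            (pvMem_pvQ t y z).2 ((pvMem_pvPairs t hnd y z).2 ⟨hzk, hlz, by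
              rw [pvLeaf_nb_eq_of_mem t hlz hyz]; rfl⟩)
          simp [hlz, this]
        · have hlz' : pvLeafB t z = false := by revert hlz; cases pvLeafB t z <;> simp
          have : (y, z) ∉ pvQ (pvR t) := by
            intro hm
            have := ((pvMem_pvPairs t hnd y z).1 ((pvMem_pvQ t y z).1 hm)).2.1
            rw [hlz'] at this
            simp at this
          simp [hlz', this]
      · rw [if_neg (by rintro ⟨h, _⟩; exact hy h)]
        rw [(by simpa [PySem.Dict.get?_eq_none_iff_not_mem_keys] using hy :
          t.get? y = none)]
        rfl

-- with no leaf the round is the identity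
theorem pvRound_id (t : PySem.Dict Int (PySem.Set Int))
    (h : ∀ kv ∈ t.items, PySem.Set.len kv.2 ≠ 1) : cf_748ERound t = t := by
  have hfilter : t.items.filter (fun kv => decide (PySem.Set.len kv.2 = 1)) = [] := by
    rw [List.filter_eq_nil_iff]
    intro kv hkv
    simpa using h kv hkv
  have hpairs : pvPairs t = [] := by rw [pvPairs, hfilter]; rfl
  have hT1 : pvT1 t = t := by
    rw [pvT1, PySem.List.foldl_ite_eq_foldl_filter (fun kv => PySem.Set.len kv.2 = 1)
      (fun a kv => PySem.Dict.insert a kv.1 PySem.Set.empty) t.items t, hfilter]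
    rfl
  have hQ : pvQ (pvR t) = [] := by
    rw [pvR, hpairs]
    rfl
  rw [pvRound_eq, hQ, hT1]
  rfl

theorem pvLoopA_noleaf (fuel : Nat) (t : PySem.Dict Int (PySem.Set Int))
    (h : ∀ kv ∈ t.items, PySem.Set.len kv.2 ≠ 1) :
    cf_748ELoop fuel t = if (t.size = 1 ∨ t.size = 2) ∧ fuel ≠ 0 then 0 else (t.size : Int) := by
  induction fuel with
  | zero => simp [cf_748ELoop]
  | succ n ih =>
    by_cases hs : t.size = 1 ∨ t.size = 2
    · simp [cf_748ELoop, hs]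
    · rw [cf_748ELoop, if_neg hs, pvRound_id t h, ih]
      simp [hs]

-- ---------- S5: consequences of the round spec ----------
theorem pvRound_nb (t : PySem.Dict Int (PySem.Set Int)) (hG : pvGood t) (h3 : 3 ≤ t.size)
    (y : Int) : pvNb (cf_748ERound t) y =
      if y ∈ t.keys ∧ pvLeafB t y = false
      then (pvNb t y).filter (fun z => !pvLeafB t z) else [] := by
  have hg := (pvRound_spec t hG h3).2 y
  by_cases hc : y ∈ t.keys ∧ pvLeafB t y = false
  · rw [if_pos hc] at hg
    rw [if_pos hc, pvNb_eq_of_get? _ hg]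
  · rw [if_neg hc] at hg
    rw [if_neg hc]
    simp [pvNb, PySem.Dict.getD_eq_get?_getD, hg, PySem.Set.empty]

theorem pvRound_mem_keys (t : PySem.Dict Int (PySem.Set Int)) (hG : pvGood t) (h3 : 3 ≤ t.size)
    (y : Int) : y ∈ (cf_748ERound t).keys ↔ y ∈ t.keys ∧ pvLeafB t y = false := by
  rw [(pvRound_spec t hG h3).1, List.mem_filter]
  constructor
  · rintro ⟨h1, h2⟩
    exact ⟨h1, by revert h2; cases pvLeafB t y <;> simp⟩
  · rintro ⟨h1, h2⟩
    exact ⟨h1, by rw [h2]; rfl⟩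

theorem pvGood_round (t : PySem.Dict Int (PySem.Set Int)) (hG : pvGood t) (h3 : 3 ≤ t.size) :
    pvGood (cf_748ERound t) := by
  have hnd := hG.1
  have hvn := hG.2.1
  have hsym := hG.2.2.1
  have hkeys := (pvRound_spec t hG h3).1
  have hnb := pvRound_nb t hG h3
  have hmem := pvRound_mem_keys t hG h3
  refine ⟨?_, ?_, ?_, ?_⟩
  · rw [hkeys]; exact hnd.filter _
  · intro x
    rw [hnb x]
    by_cases hc : x ∈ t.keys ∧ pvLeafB t x = false
    · rw [if_pos hc]; exact (hvn x).filter _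
    · rw [if_neg hc]; exact List.nodup_nil
  · intro x y hy
    rw [hnb x] at hy
    by_cases hc : x ∈ t.keys ∧ pvLeafB t x = false
    · rw [if_pos hc] at hy
      obtain ⟨hy1, hy2⟩ := List.mem_filter.1 hy
      obtain ⟨hyk, hyx, hxy⟩ := hsym x y hy1
      have hly : pvLeafB t y = false := by revert hy2; cases pvLeafB t y <;> simp
      refine ⟨(hmem y).2 ⟨hyk, hly⟩, hyx, ?_⟩
      rw [hnb y, if_pos ⟨hyk, hly⟩, List.mem_filter]
      exact ⟨hxy, by rw [hc.2]; rfl⟩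
    · rw [if_neg hc] at hy
      simp at hy
  · exact pvConnPreserved t (cf_748ERound t) ⟨hnd, hvn, hsym, hG.2.2.2⟩ hmem
      (fun y z hy => by
        rw [hnb y, if_pos ((hmem y).1 hy), List.mem_filter]
        constructor
        · rintro ⟨h1, h2⟩
          exact ⟨h1, by revert h2; cases pvLeafB t z <;> simp⟩
        · rintro ⟨h1, h2⟩
          exact ⟨h1, by rw [h2]; rfl⟩)

theorem pvRound_size (t : PySem.Dict Int (PySem.Set Int)) (hG : pvGood t) (h3 : 3 ≤ t.size) :
    ((cf_748ERound t).size : Int)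
      = (t.size : Int) - ((t.keys.filter (fun y => pvLeafB t y)).length : Int) := by
  rw [pvSize_eq_keys_length, pvSize_eq_keys_length, (pvRound_spec t hG h3).1]
  have h := List.length_eq_length_filter_add (l := t.keys) (fun y => pvLeafB t y)
  have h2 : (t.keys.filter (fun y => !pvLeafB t y)).length
      = (t.keys.filter (fun y => !(fun y => pvLeafB t y) y)).length := rfl
  rw [h2]
  omega

-- ---------- S6: B-side loop shapes ----------
theorem pvDeg_fold (ws : List Int) (dd : PySem.Dict Int Int) (v : Int) :
    (ws.foldl (fun d x => PySem.Dict.insert d x (PySem.Dict.getD d x 0 - 1)) dd).getD v 0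
      = dd.getD v 0 - ws.count v := by
  induction ws generalizing dd with
  | nil => simp
  | cons w ws ih =>
    simp only [List.foldl_cons]
    rw [ih]
    by_cases hv : v = w
    · subst hv
      rw [PySem.Dict.getD_insert]
      simp [List.count_cons]
      omega
    · rw [PySem.Dict.getD_insert, if_neg hv]
      have : (w :: ws).count v = ws.count v := by
        rw [List.count_cons]
        simp [Ne.symm hv, hv]
      rw [this]

theorem pvCount_flatMap_nodup (fr : List Int) (f : Int → List Int)
    (hnd : ∀ x, (f x).Nodup) (v : Int) :
    (fr.flatMap f).count v = fr.countP (fun x => decide (v ∈ f x)) := by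
  induction fr with
  | nil => simp
  | cons x fr ih =>
    rw [List.flatMap_cons, List.count_append, ih, List.countP_cons]
    have : (f x).count v = if v ∈ f x then 1 else 0 := List.Nodup.count (hnd x)
    by_cases hm : v ∈ f x <;> simp [this, hm] <;> omega

theorem pvFilterMap_if {β : Type} (l : List (Int × β)) (p : Int × β → Prop)
    [DecidablePred p] :
    l.filterMap (fun q => if p q then some q.1 else none)
      = (l.filter (fun q => decide (p q))).map (·.1) := by
  induction l with
  | nil => rfl
  | cons q l ih =>
    by_cases hq : p q <;> simp [List.filterMap_cons, List.filter_cons, hq, ih]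

-- ---------- S7: the bisimulation invariant and the main induction ----------
def pvInv (d t : PySem.Dict Int (PySem.Set Int)) (rem : PySem.Set Int)
    (deg : PySem.Dict Int Int) (fr : List Int) : Prop :=
  pvGood t ∧ 3 ≤ t.size ∧
  (∀ y ∈ t.keys, y ∈ d.keys) ∧
  (∀ y ∈ t.keys, pvNb t y = (pvNb d y).filter (fun z => decide (z ∈ t.keys))) ∧
  (∀ y, y ∈ d.keys → (y ∉ rem ↔ y ∈ t.keys)) ∧
  (∀ y ∈ t.keys, deg.getD y 0 = ((pvNb t y).length : Int)) ∧
  fr.Nodup ∧ (∀ x, x ∈ fr ↔ x ∈ t.keys ∧ pvLeafB t x = true)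

theorem pvMain (d : PySem.Dict Int (PySem.Set Int)) (hGd : pvGood d) :
    ∀ (fuel : Nat) (t : PySem.Dict Int (PySem.Set Int)) (rem : PySem.Set Int)
      (deg : PySem.Dict Int Int) (fr : List Int),
      ((t.size = 1 ∨ t.size = 2) ∨ pvInv d t rem deg fr) →
      cf_748ELoop fuel t = cf_748EAltLoop d fuel rem deg fr (t.size : Int) := by
  intro fuel
  induction fuel with
  | zero => intro t rem deg fr _; rfl
  | succ n ih =>
    intro t rem deg fr hinv
    rcases hinv with hs | hinv
    · rw [cf_748ELoop, if_pos hs, cf_748EAltLoop, if_pos (by omega)]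
    · obtain ⟨hG, h3, hsubk, hsub, hrem, hdeg, hfrnd, hfr⟩ := hinv
      have hnd := hG.1
      have hvn := hG.2.1
      have hsym := hG.2.2.1
      have hs : ¬ (t.size = 1 ∨ t.size = 2) := by omega
      have hs' : ¬ ((t.size : Int) = 1 ∨ (t.size : Int) = 2) := by omega
      rw [cf_748ELoop, if_neg hs, cf_748EAltLoop, if_neg hs']
      by_cases hfre : fr = []
      · -- no leaf: A's rounds are all identities, B returns the size at once
        rw [if_pos hfre]
        have hnol : ∀ kv ∈ t.items, PySem.Set.len kv.2 ≠ 1 := by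
          intro kv hkv hlen
          have := (pvLeaf_iff_items t hnd kv.1).1 ⟨kv, hkv, rfl, hlen⟩
          rw [← hfr kv.1] at this
          rw [hfre] at this
          simp at this
        rw [pvRound_id t hnol, pvLoopA_noleaf n t hnol]
        simp [hs]
      · rw [if_neg hfre]
        dsimp only
        -- B's round, flattened
        set rem' := fr.foldl (fun r x => PySem.Set.add r x) rem with hrem'def
        have hmem_rem' : ∀ x, x ∈ rem' ↔ x ∈ rem ∨ x ∈ fr := by
          intro x
          rw [hrem'def]
          exact PySem.Set.mem_update rem fr x
        set ws := (fr.flatMap (fun x => pvNb d x)).filter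
          (fun v => !(PySem.Set.contains rem' v)) with hwsdef
        have hdt : fr.foldl
            (fun (st : PySem.Dict Int Int × List Int) x =>
              (PySem.Dict.getD d x PySem.Set.empty).foldl
                (fun (st2 : PySem.Dict Int Int × List Int) v =>
                  if PySem.Set.contains rem' v then st2
                  else (PySem.Dict.insert st2.1 v (PySem.Dict.getD st2.1 v 0 - 1), st2.2 ++ [v]))
                st)
            (deg, ([] : List Int))
          = (ws.foldl (fun dd x => PySem.Dict.insert dd x (PySem.Dict.getD dd x 0 - 1)) deg, ws) := by
          rw [← List.foldl_flatMap]
          have hstep : (fun (st2 : PySem.Dict Int Int × List Int) v =>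
              if PySem.Set.contains rem' v then st2
              else (PySem.Dict.insert st2.1 v (PySem.Dict.getD st2.1 v 0 - 1), st2.2 ++ [v]))
            = (fun (st2 : PySem.Dict Int Int × List Int) v =>
                if (!PySem.Set.contains rem' v) then
                  ((fun dd x => PySem.Dict.insert dd x (PySem.Dict.getD dd x 0 - 1)) st2.1 v,
                   (fun l x => l ++ [x]) st2.2 v)
                else st2) := by
            funext st2 v
            cases hc : PySem.Set.contains rem' v <;> simp [hc]
          rw [hstep, PySem.List.foldl_if_eq_foldl_filter
            (fun v => !PySem.Set.contains rem' v)
            (fun (st2 : PySem.Dict Int Int × List Int) v =>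
              ((fun dd x => PySem.Dict.insert dd x (PySem.Dict.getD dd x 0 - 1)) st2.1 v,
               (fun l x => l ++ [x]) st2.2 v))]
          rw [PySem.List.foldl_prod_mk
            (fun dd x => PySem.Dict.insert dd x (PySem.Dict.getD dd x 0 - 1))
            (fun l x => l ++ [x])]
          rw [PySem.List.foldl_append_singleton_eq_self]
          rw [hwsdef]
          rfl
        rw [hdt]
        -- facts about the peeled graph and B's new state
        have hGr := pvGood_round t hG h3
        have hkeys' := pvRound_mem_keys t hG h3
        have hnb' := pvRound_nb t hG h3
        have halive' : ∀ v, v ∈ d.keys → (v ∉ rem' ↔ v ∈ (cf_748ERound t).keys) := by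
          intro v hv
          rw [hmem_rem' v, hkeys' v]
          constructor
          · intro h
            push_neg at h
            have hva : v ∈ t.keys := (hrem v hv).1 h.1
            refine ⟨hva, ?_⟩
            rcases Bool.eq_false_or_eq_true (pvLeafB t v) with hb | hb
            · exact absurd ((hfr v).2 ⟨hva, hb⟩) h.2
            · exact hb
          · rintro ⟨hva, hlv⟩
            push_neg
            refine ⟨(hrem v hv).2 hva, ?_⟩
            intro hvf
            rw [((hfr v).1 hvf).2] at hlv
            simp at hlv
        have hws_mem : ∀ v, v ∈ ws ↔ (v ∈ (cf_748ERound t).keys ∧ ∃ x ∈ fr, v ∈ pvNb t x) := by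
          intro v
          rw [hwsdef, List.mem_filter, List.mem_flatMap]
          constructor
          · rintro ⟨⟨x, hx, hvx⟩, hcf⟩
            have hxa : x ∈ t.keys := ((hfr x).1 hx).1
            have hvd : v ∈ d.keys := (hGd.2.2.1 x v hvx).1
            have hva' : v ∈ (cf_748ERound t).keys := by
              refine (halive' v hvd).1 (fun hm => ?_)
              rw [(PySem.Set.contains_iff rem' v).2 hm] at hcf
              simp at hcf
            refine ⟨hva', x, hx, ?_⟩
            rw [hsub x hxa, List.mem_filter]
            refine ⟨hvx, by simp [((hkeys' v).1 hva').1]⟩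
          · rintro ⟨hva', x, hx, hvx⟩
            have hxa : x ∈ t.keys := ((hfr x).1 hx).1
            have hvxd : v ∈ pvNb d x := by
              rw [hsub x hxa] at hvx
              exact (List.mem_filter.1 hvx).1
            have hvd : v ∈ d.keys := (hGd.2.2.1 x v hvxd).1
            refine ⟨⟨x, hx, hvxd⟩, ?_⟩
            have hnm := (halive' v hvd).2 hva'
            have : PySem.Set.contains rem' v = false := by
              rcases Bool.eq_false_or_eq_true (PySem.Set.contains rem' v) with hb | hb
              · exact absurd ((PySem.Set.contains_iff rem' v).1 hb) hnm
              · exact hb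
            simpa using hnm
        have hws_count : ∀ v, v ∈ (cf_748ERound t).keys →
            (ws.count v : Int) = (((pvNb t v).filter (fun z => pvLeafB t z)).length : Int) := by
          intro v hva'
          have hva : v ∈ t.keys := ((hkeys' v).1 hva').1
          have hnotrem : v ∉ rem' := (halive' v (hsubk v hva)).2 hva'
          have hc1 : ws.count v = (fr.flatMap (fun x => pvNb d x)).count v := by
            rw [hwsdef]
            refine List.count_filter ?_
            have : PySem.Set.contains rem' v = false := by
              rcases Bool.eq_false_or_eq_true (PySem.Set.contains rem' v) with hb | hb
              · exact absurd ((PySem.Set.contains_iff rem' v).1 hb) hnotrem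
              · exact hb
            simpa using hnotrem
          have hc2 : (fr.flatMap (fun x => pvNb d x)).count v
              = fr.countP (fun x => decide (v ∈ pvNb d x)) :=
            pvCount_flatMap_nodup fr _ (fun x => hGd.2.1 x) v
          have hc3 : fr.countP (fun x => decide (v ∈ pvNb d x))
              = fr.countP (fun x => decide (x ∈ pvNb t v)) := by
            refine List.countP_congr ?_
            intro x hx
            have hxa : x ∈ t.keys := ((hfr x).1 hx).1
            have hiff : (v ∈ pvNb d x) ↔ (x ∈ pvNb t v) := by
              constructor
              · intro h
                have : v ∈ pvNb t x := by
                  rw [hsub x hxa, List.mem_filter]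
                  exact ⟨h, by simp [hva]⟩
                exact (hsym x v this).2.2
              · intro h
                have := (hsym v x h).2.2
                rw [hsub x hxa, List.mem_filter] at this
                exact this.1
            simp [hiff]
          have hc4 : fr.countP (fun x => decide (x ∈ pvNb t v))
              = ((pvNb t v).filter (fun z => decide (z ∈ fr))).length := by
            rw [List.countP_eq_length_filter]
            refine List.Perm.length_eq ?_
            refine (List.perm_ext_iff_of_nodup (hfrnd.filter _) ((hvn v).filter _)).2 ?_
            intro z
            rw [List.mem_filter, List.mem_filter]
            constructor
            · rintro ⟨h1, h2⟩
              exact ⟨by simpa using h2, by simp [h1]⟩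
            · rintro ⟨h1, h2⟩
              exact ⟨by simpa using h2, by simp [h1]⟩
          have hc5 : ((pvNb t v).filter (fun z => decide (z ∈ fr))).length
              = ((pvNb t v).filter (fun z => pvLeafB t z)).length := by
            congr 1
            refine List.filter_congr ?_
            intro z hz
            have hza : z ∈ t.keys := (hsym v z hz).1
            by_cases hlz : pvLeafB t z = true
            · simp [hlz, (hfr z).2 ⟨hza, hlz⟩]
            · have : z ∉ fr := fun hc => hlz ((hfr z).1 hc).2
              simp [this, hlz]
          rw [hc1, hc2, hc3, hc4, hc5]
        have hlensplit : ∀ v, v ∈ t.keys →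
            ((pvNb t v).length : Int)
              = (((pvNb t v).filter (fun z => pvLeafB t z)).length : Int)
                + (((pvNb t v).filter (fun z => !pvLeafB t z)).length : Int) := by
          intro v _
          have := List.length_eq_length_filter_add (l := pvNb t v) (fun z => pvLeafB t z)
          have h2 : ((pvNb t v).filter (fun z => !pvLeafB t z)).length
              = ((pvNb t v).filter (fun z => !(fun z => pvLeafB t z) z)).length := rfl
          rw [h2]
          omega
        have hdeg' : ∀ y, y ∈ (cf_748ERound t).keys →
            (ws.foldl (fun dd x => PySem.Dict.insert dd x (PySem.Dict.getD dd x 0 - 1)) deg).getD y 0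
              = ((pvNb (cf_748ERound t) y).length : Int) := by
          intro y hy'
          have hya : y ∈ t.keys := ((hkeys' y).1 hy').1
          rw [pvDeg_fold, hdeg y hya]
          rw [hnb' y, if_pos ⟨hya, ((hkeys' y).1 hy').2⟩]
          by_cases hyw : y ∈ ws
          · rw [hws_count y hy', hlensplit y hya]
            omega
          · have hcnt : ws.count y = 0 := List.count_eq_zero.2 hyw
            have hfe : (pvNb t y).filter (fun z => !pvLeafB t z) = pvNb t y := by
              rw [List.filter_eq_self]
              intro z hz
              rcases Bool.eq_false_or_eq_true (pvLeafB t z) with hb | hb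
              · exfalso
                apply hyw
                rw [hws_mem y]
                have hza : z ∈ t.keys := (hsym y z hz).1
                exact ⟨hy', z, (hfr z).2 ⟨hza, hb⟩, (hsym y z hz).2.2⟩
              · simp [hb]
            rw [hfe, hcnt]
            simp
        have hfr'_mem : ∀ v, v ∈ (PySem.List.dedup ws).filter
              (fun v => (ws.foldl (fun dd x => PySem.Dict.insert dd x
                (PySem.Dict.getD dd x 0 - 1)) deg).getD v 0 == 1)
            ↔ (v ∈ (cf_748ERound t).keys ∧ pvLeafB (cf_748ERound t) v = true) := by
          intro v
          rw [List.mem_filter, PySem.List.mem_dedup]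
          constructor
          · rintro ⟨h1, h2⟩
            have hv' : v ∈ (cf_748ERound t).keys := ((hws_mem v).1 h1).1
            refine ⟨hv', ?_⟩
            have := hdeg' v hv'
            rw [this] at h2
            simp only [beq_iff_eq] at h2
            simp [pvLeafB]
            omega
          · rintro ⟨hv', hlv⟩
            have hlen1 : (pvNb (cf_748ERound t) v).length = 1 := by
              simpa [pvLeafB] using hlv
            constructor
            · by_contra hvw
              have hva : v ∈ t.keys := ((hkeys' v).1 hv').1
              have hfe : (pvNb t v).filter (fun z => !pvLeafB t z) = pvNb t v := by
                rw [List.filter_eq_self]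
                intro z hz
                rcases Bool.eq_false_or_eq_true (pvLeafB t z) with hb | hb
                · exfalso
                  apply hvw
                  rw [hws_mem v]
                  have hza : z ∈ t.keys := (hsym v z hz).1
                  exact ⟨hv', z, (hfr z).2 ⟨hza, hb⟩, (hsym v z hz).2.2⟩
                · simp [hb]
              have : pvNb (cf_748ERound t) v = pvNb t v := by
                rw [hnb' v, if_pos ⟨hva, ((hkeys' v).1 hv').2⟩, hfe]
              rw [this] at hlen1
              have : pvLeafB t v = true := by simp [pvLeafB]; omega
              rw [((hkeys' v).1 hv').2] at this
              simp at this
            · rw [hdeg' v hv']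
              simp [hlen1]
        have hsize' : ((cf_748ERound t).size : Int) = (t.size : Int) - (fr.length : Int) := by
          rw [pvRound_size t hG h3]
          have hperm : fr.Perm (t.keys.filter (fun y => pvLeafB t y)) := by
            refine (List.perm_ext_iff_of_nodup hfrnd (hnd.filter _)).2 ?_
            intro x
            rw [List.mem_filter, hfr x]
          rw [hperm.length_eq]
        rw [show (t.size : Int) - (fr.length : Int)
            = ((cf_748ERound t).size : Int) from hsize'.symm]
        -- recurse: either the peeled graph is small, or the invariant holds again
        by_cases hsz : (cf_748ERound t).size = 1 ∨ (cf_748ERound t).size = 2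
        · exact ih (cf_748ERound t) rem' _ _ (Or.inl hsz)
        · have hpos : 1 ≤ (cf_748ERound t).size := by
            obtain ⟨x, hx⟩ := List.exists_mem_of_ne_nil fr hfre
            obtain ⟨v, hv, hlv⟩ := pvSurvivor t hG h3 ((hfr x).1 hx).1 ((hfr x).1 hx).2
            have : v ∈ (cf_748ERound t).keys := (hkeys' v).2 ⟨hv, hlv⟩
            rw [pvSize_eq_keys_length]
            exact List.length_pos_of_mem this
          refine ih (cf_748ERound t) rem' _ _ (Or.inr ⟨hGr, by omega, ?_, ?_, ?_, ?_, ?_, ?_⟩)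
          · intro y hy
            exact hsubk y ((hkeys' y).1 hy).1
          · intro y hy
            have hya : y ∈ t.keys := ((hkeys' y).1 hy).1
            rw [hnb' y, if_pos ⟨hya, ((hkeys' y).1 hy).2⟩, hsub y hya, List.filter_filter]
            refine List.filter_congr ?_
            intro z hz
            have hzd : z ∈ d.keys := (hGd.2.2.1 y z hz).1
            by_cases hzt : z ∈ (cf_748ERound t).keys
            · have hza : z ∈ t.keys := ((hkeys' z).1 hzt).1
              simp [hzt, hza, ((hkeys' z).1 hzt).2]
            · simp only [hzt, decide_eq_true_eq]
              by_cases hza : z ∈ t.keys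
              · have hlz : pvLeafB t z = true := by
                  rcases Bool.eq_false_or_eq_true (pvLeafB t z) with hb | hb
                  · exact hb
                  · exact absurd ((hkeys' z).2 ⟨hza, hb⟩) hzt
                simp [hza, hlz, hzt]
              · simp [hza, hzt]
          · exact halive'
          · exact hdeg'
          · exact (PySem.List.nodup_dedup ws).filter _
          · exact hfr'_mem

-- ---------- S8: the initial state ----------
theorem pvSmall (d : PySem.Dict Int (PySem.Set Int)) (hs : d.size = 1 ∨ d.size = 2)
    (fuel : Nat) (rem : PySem.Set Int) (deg : PySem.Dict Int Int) (fr : List Int) :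
    cf_748ELoop fuel d = cf_748EAltLoop d fuel rem deg fr (d.size : Int) := by
  cases fuel with
  | zero => rfl
  | succ n => rw [cf_748ELoop, if_pos hs, cf_748EAltLoop, if_pos (by omega)]

theorem pvNoLeafCase (d : PySem.Dict Int (PySem.Set Int))
    (h : ∀ p ∈ d.items, PySem.Set.len p.2 ≠ 1) (fuel : Nat)
    (rem : PySem.Set Int) (deg : PySem.Dict Int Int) :
    cf_748ELoop fuel d = cf_748EAltLoop d fuel rem deg [] (d.size : Int) := by
  rw [pvLoopA_noleaf fuel d h]
  cases fuel with
  | zero => simp [cf_748EAltLoop]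
  | succ n =>
    by_cases hs : d.size = 1 ∨ d.size = 2
    · rw [if_pos (⟨hs, Nat.succ_ne_zero n⟩ : (d.size = 1 ∨ d.size = 2) ∧ n + 1 ≠ 0)]
      rw [cf_748EAltLoop, if_pos (show (d.size : Int) = 1 ∨ (d.size : Int) = 2 by omega)]
    · rw [if_neg (fun hc => hs hc.1)]
      rw [cf_748EAltLoop, if_neg (show ¬ ((d.size : Int) = 1 ∨ (d.size : Int) = 2) by omega),
        if_pos rfl]

theorem pvFold_insert_valP {ν : Type} (P : ν → Prop) (l : List (Int × ν))
    (d : PySem.Dict Int ν) (hl : ∀ p ∈ l, P p.2) (hd : ∀ p ∈ d.items, P p.2) :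
    ∀ p ∈ (l.foldl (fun acc q => acc.insert q.1 q.2) d).items, P p.2 := by
  induction l generalizing d with
  | nil => exact hd
  | cons q l ih =>
    simp only [List.foldl_cons]
    refine ih _ (fun p hp => hl p (by simp [hp])) ?_
    intro p hp
    rcases (PySem.Dict.mem_items_insert d q.1 q.2 p).1 hp with h | ⟨h, _⟩
    · rw [h]; exact hl q (by simp)
    · exact hd p h

theorem pvItems_ofList {ν : Type} (l : List (Int × ν)) (h : (l.map (·.1)).Nodup) :
    (PySem.Dict.ofList l).items = l := by
  have := PySem.Dict.items_foldl_insert_fresh l (fun p => p.1) (fun p => p.2)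
    PySem.Dict.empty (fun a _ => rfl) h
  simpa using this

-- breadth-step soundness for the connectivity test
theorem pvGrow_mem (d : PySem.Dict Int (PySem.Set Int)) (s a : List Int) (y : Int) :
    y ∈ s.foldl (fun acc x => PySem.Set.update acc (pvNb d x)) a
      ↔ y ∈ a ∨ ∃ x ∈ s, y ∈ pvNb d x := by
  induction s generalizing a with
  | nil => simp
  | cons x s ih =>
    simp only [List.foldl_cons]
    rw [ih, PySem.Set.mem_update]
    constructor
    · rintro ((h | h) | ⟨x', hx', h⟩)
      · exact Or.inl h
      · exact Or.inr ⟨x, by simp, h⟩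
      · exact Or.inr ⟨x', by simp [hx'], h⟩
    · rintro (h | ⟨x', hx', h⟩)
      · exact Or.inl (Or.inl h)
      · rcases List.mem_cons.1 hx' with rfl | hx'
        · exact Or.inl (Or.inr h)
        · exact Or.inr ⟨x', hx', h⟩

theorem pvIter_sound (d : PySem.Dict Int (PySem.Set Int)) (x0 : Int) :
    ∀ (n : Nat) (s : List Int),
      (∀ y ∈ s, Relation.ReflTransGen (pvStep d) x0 y) →
      ∀ y ∈ (pvGrow d)^[n] s, Relation.ReflTransGen (pvStep d) x0 y := by
  intro n
  induction n with
  | zero => intro s hs y hy; exact hs y hy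
  | succ m ih =>
    intro s hs y hy
    rw [Function.iterate_succ_apply] at hy
    refine ih (pvGrow d s) ?_ y hy
    intro z hz
    rw [pvGrow, pvGrow_mem] at hz
    rcases hz with hz | ⟨x, hx, hz⟩
    · exact hs z hz
    · exact (hs x hx).tail hz

theorem pvGood_of_pre (tree : List (Int × List Int))
    (hsym : ∀ p ∈ (pvToDict tree).items, ∀ y ∈ p.2,
      y ≠ p.1 ∧ y ∈ (pvToDict tree).keys ∧ p.1 ∈ pvNb (pvToDict tree) y)
    (hconn : pvConnB (pvToDict tree)) : pvGood (pvToDict tree) := by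
  set d := pvToDict tree with hd
  have hnd : d.keys.Nodup := PySem.Dict.nodup_keys_ofList _
  have hvn : ∀ x, (pvNb d x).Nodup := by
    intro x
    rcases hg : d.get? x with _ | s
    · simp [pvNb, PySem.Dict.getD_eq_get?_getD, hg, PySem.Set.empty]
    · rw [pvNb_eq_of_get? d hg]
      refine pvFold_insert_valP (fun v => v.Nodup) _ PySem.Dict.empty ?_
        (by intro p hp
            simp [show PySem.Dict.empty.items = ([] : List (Int × PySem.Set Int)) from rfl] at hp)
        (x, s) (PySem.Dict.mem_items_of_get?_eq_some _ hg)
      intro p hp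
      obtain ⟨q, _, hqe⟩ := List.mem_map.1 hp
      rw [← hqe]
      exact PySem.Set.nodup_ofList _
  have hsym' : ∀ x y, y ∈ pvNb d x → y ∈ d.keys ∧ y ≠ x ∧ x ∈ pvNb d y := by
    intro x y hy
    have hx : x ∈ d.keys := pvMem_keys_of_nb_ne_nil d (fun hnil => by rw [hnil] at hy; simp at hy)
    have hitem : (x, pvNb d x) ∈ d.items :=
      PySem.Dict.mem_items_of_get?_eq_some _ (pvGet?_of_mem d hnd hx)
    obtain ⟨h1, h2, h3⟩ := hsym (x, pvNb d x) hitem y hy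
    exact ⟨h2, h1, h3⟩
  refine ⟨hnd, hvn, hsym', ?_⟩
  obtain ⟨hne, hcl⟩ := hconn
  have hstep_symm : Symmetric (pvStep d) := fun u v h => (hsym' u v h).2.2
  have hx0 : d.keys.headD 0 ∈ d.keys := by
    cases hk : d.keys with
    | nil => exact absurd hk hne
    | cons a l => simp [hk]
  have hreach : ∀ y ∈ d.keys, Relation.ReflTransGen (pvStep d) (d.keys.headD 0) y := by
    intro y hy
    exact pvIter_sound d _ d.size [d.keys.headD 0]
      (by intro z hz
          rw [List.mem_singleton] at hz
          rw [hz]) y (hcl y hy)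
  intro x y hx hy
  exact Relation.ReflTransGen.trans
    ((Relation.ReflTransGen.symmetric hstep_symm) (hreach x hx)) (hreach y hy)


-- ===== VERDICT (by name: the statement is the Claim_ definition above) =====
theorem cf_748E_spec : Claim_equal_cf_748E := by
  intro tree k _hdom hpre
  show cf_748E tree k = cf_748E_alt tree k
  rw [cf_748E, cf_748E_alt]
  rcases hpre with hk | hs | hs | hnol | ⟨hsym, hconn⟩
  · rw [Int.toNat_of_nonpos hk]
    rfl
  · exact pvSmall _ (Or.inl hs) _ _ _ _
  · exact pvSmall _ (Or.inr hs) _ _ _ _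
  · -- no key has a singleton neighbour set: B's initial frontier is empty
    have hfr0 : (PySem.Dict.ofList ((pvToDict tree).items.map
          (fun p => (p.1, (p.2.length : Int))))).items.filterMap
          (fun p => if p.2 = 1 then some p.1 else none) = [] := by
      rw [List.filterMap_eq_nil_iff]
      intro p hp
      rw [pvItems_ofList _ (by
        rw [List.map_map]
        exact PySem.Dict.nodup_keys_ofList _)] at hp
      obtain ⟨q, hq, hqe⟩ := List.mem_map.1 hp
      have := hnol q hq
      rw [← hqe]
      simp only [PySem.Set.len] at this
      simp [this]
    rw [hfr0]
    exact pvNoLeafCase _ hnol _ _ _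
  · -- the connected symmetric case: run the bisimulation
    have hGd := pvGood_of_pre tree hsym hconn
    set d := pvToDict tree with hd
    have hnd : d.keys.Nodup := hGd.1
    have hdeg0 : (PySem.Dict.ofList (d.items.map (fun p => (p.1, (p.2.length : Int))))).items
        = d.items.map (fun p => (p.1, (p.2.length : Int))) :=
      pvItems_ofList _ (by rw [List.map_map]; exact PySem.Dict.nodup_keys_ofList _)
    have hdeg0nd : (PySem.Dict.ofList (d.items.map
        (fun p => (p.1, (p.2.length : Int))))).keys.Nodup := by
      show ((PySem.Dict.ofList (d.items.map (fun p => (p.1, (p.2.length : Int))))).items.map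
        (fun q => q.1)).Nodup
      rw [hdeg0, List.map_map]
      exact PySem.Dict.nodup_keys_ofList _
    have hdeg0get : ∀ y ∈ d.keys,
        (PySem.Dict.ofList (d.items.map (fun p => (p.1, (p.2.length : Int))))).getD y 0
          = ((pvNb d y).length : Int) := by
      intro y hy
      have hitem : (y, pvNb d y) ∈ d.items :=
        PySem.Dict.mem_items_of_get?_eq_some _ (pvGet?_of_mem d hnd hy)
      have : (y, ((pvNb d y).length : Int)) ∈ (PySem.Dict.ofList (d.items.map
          (fun p => (p.1, (p.2.length : Int))))).items := by
        rw [hdeg0]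
        exact List.mem_map.2 ⟨(y, pvNb d y), hitem, rfl⟩
      exact PySem.Dict.getD_of_mem_items _ this hdeg0nd 0
    have hfr0 : ∀ x, x ∈ (PySem.Dict.ofList (d.items.map
          (fun p => (p.1, (p.2.length : Int))))).items.filterMap
          (fun p => if p.2 = 1 then some p.1 else none)
        ↔ (x ∈ d.keys ∧ pvLeafB d x = true) := by
      intro x
      rw [hdeg0, ← pvLeaf_iff_items d hnd x, List.mem_filterMap]
      constructor
      · rintro ⟨p, hp, hpe⟩
        obtain ⟨q, hq, hqe⟩ := List.mem_map.1 hp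
        by_cases hc : p.2 = 1
        · rw [if_pos hc] at hpe
          refine ⟨q, hq, ?_, ?_⟩
          · rw [← Option.some_inj.1 hpe, ← hqe]
          · rw [PySem.Set.len]
            rw [← hqe] at hc
            exact hc
        · rw [if_neg hc] at hpe
          simp at hpe
      · rintro ⟨q, hq, hq1, hq2⟩
        refine ⟨(q.1, (q.2.length : Int)), List.mem_map.2 ⟨q, hq, rfl⟩, ?_⟩
        rw [if_pos (by simpa [PySem.Set.len] using hq2)]
        simp [hq1]
    have hfr0nd : ((PySem.Dict.ofList (d.items.map
          (fun p => (p.1, (p.2.length : Int))))).items.filterMap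
          (fun p => if p.2 = 1 then some p.1 else none)).Nodup := by
      rw [hdeg0, pvFilterMap_if]
      refine List.Nodup.sublist (List.Sublist.map _ List.filter_sublist) ?_
      rw [List.map_map]
      exact PySem.Dict.nodup_keys_ofList _
    rcases Nat.lt_or_ge d.size 3 with hsmall | h3
    · rcases Nat.eq_zero_or_pos d.size with h0 | h1
      · exfalso
        obtain ⟨hne, _⟩ := hconn
        apply hne
        have : d.keys.length = 0 := by rw [← pvSize_eq_keys_length, h0]
        exact List.eq_nil_of_length_eq_zero this
      · exact pvMain d hGd k.toNat d PySem.Set.empty _ _ (Or.inl (by omega))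
    · refine pvMain d hGd k.toNat d PySem.Set.empty _ _ (Or.inr ⟨hGd, h3, ?_, ?_, ?_, ?_, ?_, ?_⟩)
      · exact fun y hy => hy
      · intro y hy
        rw [List.filter_eq_self.2]
        intro z hz
        simp [(hGd.2.2.1 y z hz).1]
      · intro y hy
        simp [PySem.Set.empty, hy]
      · exact hdeg0get
      · exact hfr0nd
      · exact hfr0
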